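-- pv_equiv track=rewrite | github.com/hyo-jae-jung/beakjoon | solved/11497.py | logs
-- ===== SOURCE A (Python) =====
-- from collections import deque
--
-- def logs(arr:list):
--     arr.sort()
--     arr = deque(arr)
--     temp = deque()
--     while arr:
--         if len(arr)%2 == 0:
--             temp.append(arr.pop())
--         else:
--             temp.appendleft(arr.pop())
--
--     diff = []
--     for i in range(len(temp)-1):
--         diff.append(abs(temp[i]-temp[i+1]))
--
--     return max(diff)
-- ===== SOURCE B (Python) =====
-- def logs(arr: list):
--     arr.sort()
--     if len(arr) == 2:
--         return arr[1] - arr[0]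
--     candidates = [arr[i + 2] - arr[i] for i in range(len(arr) - 2)]
--     return max(candidates)
-- ===== Notes on version B (the rewrite author's own statement) =====
-- stated objective: simpler
-- what changed: Replaces the deque zigzag construction plus adjacent-difference scan (whose temp[i] deque indexing is O(n) per access) with a direct max over the gaps two indices apart in the sorted list (single gap when n == 2), relying on the fact that the max adjacent gap of the mountain arrangement equals the max two-apart gap.
import Mathlib
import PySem

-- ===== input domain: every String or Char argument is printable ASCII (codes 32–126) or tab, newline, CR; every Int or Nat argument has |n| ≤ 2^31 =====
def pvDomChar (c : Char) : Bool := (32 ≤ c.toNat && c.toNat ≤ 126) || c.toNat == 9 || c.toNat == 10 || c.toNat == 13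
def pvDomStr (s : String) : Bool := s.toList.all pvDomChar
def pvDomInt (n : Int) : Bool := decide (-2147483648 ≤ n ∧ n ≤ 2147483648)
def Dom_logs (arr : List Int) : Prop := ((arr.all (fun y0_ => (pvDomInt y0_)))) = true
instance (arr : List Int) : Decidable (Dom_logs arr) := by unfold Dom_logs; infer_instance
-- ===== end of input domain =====

-- B replaces A's deque zigzag construction with a direct max over gaps two apart in
-- the sorted list (objective: simpler). Both A and B sort `arr` in place (same side
-- effect); the equivalence proved here is about the return value.

-- ===== PORT A =====
-- the while-loop: pops the last element of the remaining (sorted) list, appending it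
-- at the right of temp when the remaining length is even, at the left otherwise
def logsLoop (arr temp : List Int) : List Int :=
  if h : arr = [] then temp
  else
    if arr.length % 2 == 0 then logsLoop arr.dropLast (temp ++ [arr.getLast h])
    else logsLoop arr.dropLast (arr.getLast h :: temp)
termination_by arr.length
decreasing_by
  all_goals
    simp only [List.length_dropLast]
    have : 0 < arr.length := List.length_pos_iff.mpr h
    omega

def logs (arr : List Int) : Int :=
  let s := PySem.List.sorted arr (fun x => x) false
  let temp := logsLoop s []
  let diff := (PySem.List.pyRange 0 ((temp.length : Int) - 1) 1).foldl
      (fun d i => d ++ [|PySem.List.pyGetD temp i 0 - PySem.List.pyGetD temp (i + 1) 0|]) []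
  (PySem.List.max? diff (fun y => y)).getD 0

-- ===== PORT B =====
def logs_alt (arr : List Int) : Int :=
  let s := PySem.List.sorted arr (fun x => x) false
  if s.length == 2 then
    PySem.List.pyGetD s 1 0 - PySem.List.pyGetD s 0 0
  else
    let candidates := (PySem.List.pyRange 0 ((s.length : Int) - 2) 1).map
        (fun i => PySem.List.pyGetD s (i + 2) 0 - PySem.List.pyGetD s i 0)
    (PySem.List.max? candidates (fun y => y)).getD 0

-- ===== PRECONDITION & SPEC =====
-- On lists of length < 2 both A and B raise ValueError (max() of an empty sequence).
def Pre_logs (arr : List Int) : Prop := 2 ≤ arr.length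
instance (arr : List Int) : Decidable (Pre_logs arr) := by unfold Pre_logs; infer_instance
def pvWitness_logs : List Int := [3, 1, 2]

def Spec_logs (arr : List Int) (out : Int) : Prop := out = logs_alt arr
instance (arr : List Int) (out : Int) : Decidable (Spec_logs arr out) := by unfold Spec_logs; infer_instance

-- ===== CLAIM (what is proved, stated in full; the proofs are below) =====
def Claim_equal_logs : Prop := ∀ (arr : List Int), Dom_logs arr → Pre_logs arr → Spec_logs arr (logs arr)

-- ===== LEMMAS AND PROOFS =====

-- elements at even / odd positions
def evens : List Int → List Int
  | [] => []
  | [a] => [a]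
  | a :: _ :: l => a :: evens l

def odds : List Int → List Int
  | [] => []
  | [_] => []
  | _ :: b :: l => b :: odds l

-- the mountain arrangement A builds
def zig : List Int → List Int
  | [] => []
  | [a] => [a]
  | a :: b :: l => a :: zig l ++ [b]

-- absolute differences of adjacent elements
def pairsAbs : List Int → List Int
  | a :: b :: l => |a - b| :: pairsAbs (b :: l)
  | _ => []

-- differences two apart
def gap2 : List Int → List Int
  | a :: b :: c :: l => (c - a) :: gap2 (b :: c :: l)
  | _ => []

theorem evens_snoc (l : List Int) (x : Int) :
    evens (l ++ [x]) = if l.length % 2 == 0 then evens l ++ [x] else evens l := by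
  induction l using evens.induct with
  | case1 => simp [evens]
  | case2 a => simp [evens]
  | case3 a b t ih =>
    simp only [List.cons_append, evens, ih, List.length_cons]
    have : (t.length + 1 + 1) % 2 = t.length % 2 := by omega
    rw [this]
    split <;> simp

theorem odds_snoc (l : List Int) (x : Int) :
    odds (l ++ [x]) = if l.length % 2 == 0 then odds l else odds l ++ [x] := by
  induction l using odds.induct with
  | case1 => simp [odds]
  | case2 a => simp [odds]
  | case3 a b t ih =>
    simp only [List.cons_append, odds, ih, List.length_cons]
    have : (t.length + 1 + 1) % 2 = t.length % 2 := by omega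
    rw [this]
    split <;> simp

theorem logsLoop_eq (r : List Int) : ∀ t, logsLoop r t = evens r ++ t ++ (odds r).reverse := by
  induction r using List.reverseRecOn with
  | nil => intro t; simp [logsLoop, evens, odds]
  | append_singleton r x ih =>
    intro t
    rw [logsLoop]
    have hne : r ++ [x] ≠ [] := by simp
    rw [dif_neg hne]
    simp only [List.getLast_append_singleton, List.dropLast_concat, List.length_append,
      List.length_singleton]
    rw [evens_snoc, odds_snoc]
    by_cases hc : r.length % 2 = 0
    · have h1 : ((r.length + 1) % 2 == 0) = false := by simp; omega
      have h2 : (r.length % 2 == 0) = true := by simp [hc]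
      rw [h1, h2]
      simp only [Bool.false_eq_true, if_false, if_true]
      rw [ih]
      simp
    · have h1 : ((r.length + 1) % 2 == 0) = true := by simp; omega
      have h2 : (r.length % 2 == 0) = false := by simp [hc]
      rw [h1, h2]
      simp only [Bool.false_eq_true, if_false, if_true]
      rw [ih]
      simp

theorem zig_eq (l : List Int) : evens l ++ (odds l).reverse = zig l := by
  induction l using zig.induct with
  | case1 => rfl
  | case2 a => rfl
  | case3 a b t ih =>
    simp only [evens, odds, zig, List.reverse_cons, ← ih, List.cons_append]
    simp

theorem pairsAbs_snoc' (t : List Int) (y b : Int) :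
    pairsAbs ((t ++ [y]) ++ [b]) = pairsAbs (t ++ [y]) ++ [|y - b|] := by
  induction t with
  | nil => simp [pairsAbs]
  | cons a s ih =>
    cases s with
    | nil => simp [pairsAbs]
    | cons u s' =>
      rw [show ((a :: u :: s') ++ [y]) ++ [b] = a :: (((u :: s') ++ [y]) ++ [b]) from by simp]
      rw [show pairsAbs (a :: (((u :: s') ++ [y]) ++ [b]))
          = |a - u| :: pairsAbs (((u :: s') ++ [y]) ++ [b]) from rfl]
      rw [ih]
      rw [show (a :: u :: s') ++ [y] = a :: ((u :: s') ++ [y]) from by simp]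
      rw [show pairsAbs (a :: ((u :: s') ++ [y]))
          = |a - u| :: pairsAbs ((u :: s') ++ [y]) from rfl]
      simp

-- max-fold helper
theorem foldl_max_comm (L : List Int) : ∀ a b, L.foldl max (max a b) = max a (L.foldl max b) := by
  induction L with
  | nil => intro a b; rfl
  | cons c L ih =>
    intro a b
    simp only [List.foldl_cons]
    rw [max_assoc, ih]

-- core fact: for a sorted list of length ≥ 3, the max adjacent |gap| in the mountain
-- arrangement equals the max gap two apart
theorem max_zig_eq_max_gap2 : ∀ (n : Nat) (l : List Int), l.length = n →
    l.Pairwise (· ≤ ·) → 3 ≤ l.length →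
    PySem.List.max? (pairsAbs (zig l)) (fun y => y) = PySem.List.max? (gap2 l) (fun y => y) := by
  intro n
  induction n using Nat.strong_induction_on with
  | _ n ih =>
    intro l hn hp hlen
    match l with
    | [] => simp at hlen
    | [_] => simp at hlen
    | [_, _] => simp at hlen
    | a :: b :: c :: l' =>
      have hab : a ≤ b := List.rel_of_pairwise_cons hp (by simp)
      have hac : a ≤ c := List.rel_of_pairwise_cons hp (by simp)
      have hbc : b ≤ c := List.rel_of_pairwise_cons hp.of_cons (by simp)
      match l' with
      | [] =>
        show PySem.List.max? [|a - c|, |c - b|] _ = PySem.List.max? [c - a] _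
        rw [PySem.List.max?_id_cons, PySem.List.max?_id_cons]
        simp only [List.foldl_cons, List.foldl_nil]
        congr 1
        have h1 : |a - c| = c - a := by rw [abs_sub_comm]; exact abs_of_nonneg (by omega)
        have h2 : |c - b| = c - b := abs_of_nonneg (by omega)
        rw [h1, h2]; omega
      | [d] =>
        have hbd : b ≤ d := List.rel_of_pairwise_cons hp.of_cons (by simp)
        have hcd : c ≤ d := List.rel_of_pairwise_cons hp.of_cons.of_cons (by simp)
        show PySem.List.max? [|a - c|, |c - d|, |d - b|] _ = PySem.List.max? [c - a, d - b] _
        rw [PySem.List.max?_id_cons, PySem.List.max?_id_cons]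
        simp only [List.foldl_cons, List.foldl_nil]
        congr 1
        have h1 : |a - c| = c - a := by rw [abs_sub_comm]; exact abs_of_nonneg (by omega)
        have h2 : |c - d| = d - c := by rw [abs_sub_comm]; exact abs_of_nonneg (by omega)
        have h3 : |d - b| = d - b := abs_of_nonneg (by omega)
        rw [h1, h2, h3]; omega
      | c' :: d' :: m =>
        -- l = a :: b :: L with L = c :: c' :: d' :: m, L.length ≥ 3
        have hbc' : b ≤ c' := List.rel_of_pairwise_cons hp.of_cons (by simp)
        have hpL : (c :: c' :: d' :: m).Pairwise (· ≤ ·) := hp.of_cons.of_cons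
        have hIH := ih (c :: c' :: d' :: m).length (by simp at hn ⊢; omega)
          (c :: c' :: d' :: m) rfl hpL (by simp)
        -- shape of pairsAbs (zig l)
        have hzigL : zig (c :: c' :: d' :: m) = (c :: zig (d' :: m)) ++ [c'] := by
          simp [zig]
        have hzig : zig (a :: b :: c :: c' :: d' :: m)
            = a :: (zig (c :: c' :: d' :: m) ++ [b]) := by simp [zig]
        obtain ⟨q, Q, hqQ⟩ : ∃ q Q, zig (c :: c' :: d' :: m) = c :: q :: Q := by
          rw [hzigL]
          cases zig (d' :: m) with
          | nil => exact ⟨c', [], rfl⟩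
          | cons u U => exact ⟨u, U ++ [c'], by simp⟩
        have hpairs : pairsAbs (zig (a :: b :: c :: c' :: d' :: m))
            = |a - c| :: (pairsAbs (zig (c :: c' :: d' :: m)) ++ [|c' - b|]) := by
          rw [hzig]
          conv_lhs => rw [hqQ]
          rw [show pairsAbs (a :: ((c :: q :: Q) ++ [b]))
              = |a - c| :: pairsAbs ((c :: q :: Q) ++ [b]) from rfl]
          congr 1
          rw [← hqQ, hzigL]
          rw [show (c :: zig (d' :: m) ++ [c']) ++ [b]
              = ((c :: zig (d' :: m)) ++ [c']) ++ [b] from by simp]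
          rw [pairsAbs_snoc']
        have hgap : gap2 (a :: b :: c :: c' :: d' :: m)
            = (c - a) :: (c' - b) :: gap2 (c :: c' :: d' :: m) := rfl
        -- destructure the two inner lists
        have hPP : pairsAbs (zig (c :: c' :: d' :: m)) = |c - q| :: pairsAbs (q :: Q) := by
          rw [hqQ]; rfl
        have hGG : gap2 (c :: c' :: d' :: m) = (d' - c) :: gap2 (c' :: d' :: m) := rfl
        rw [hPP, hGG] at hIH
        rw [PySem.List.max?_id_cons, PySem.List.max?_id_cons] at hIH
        have hIH' := Option.some.inj hIH
        rw [hpairs, hgap, hPP, hGG]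
        rw [PySem.List.max?_id_cons, PySem.List.max?_id_cons]
        congr 1
        have h1 : |a - c| = c - a := by rw [abs_sub_comm]; exact abs_of_nonneg (by omega)
        have h2 : |c' - b| = c' - b := abs_of_nonneg (by omega)
        rw [h1, h2]
        simp only [List.cons_append, List.foldl_cons, List.foldl_append, List.foldl_nil]
        -- LHS: foldl over pairsAbs(q::Q) then final snoc [c'-b]; RHS: foldl over gap2
        rw [foldl_max_comm, foldl_max_comm, hIH']
        omega

-- bridge: the index loops are pairsAbs / gap2
theorem range_pairsAbs : ∀ (l : List Int),
    (List.range (l.length - 1)).map (fun k => |l.getD k 0 - l.getD (k + 1) 0|) = pairsAbs l := by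
  intro l
  induction l using pairsAbs.induct with
  | case1 a b t ih =>
    simp only [List.length_cons, Nat.add_sub_cancel]
    rw [List.range_succ_eq_map, List.map_cons, List.map_map]
    simp only [List.length_cons, Nat.add_sub_cancel] at ih
    rw [show pairsAbs (a :: b :: t) = |a - b| :: pairsAbs (b :: t) from rfl, ← ih]
    simp [Function.comp_def]
  | case2 t h =>
    match t, h with
    | [], _ => rfl
    | [a], _ => rfl
    | a :: b :: t, h => exact (h a b t rfl).elim

theorem range_gap2 : ∀ (l : List Int),
    (List.range (l.length - 2)).map (fun k => l.getD (k + 2) 0 - l.getD k 0) = gap2 l := by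
  intro l
  induction l using gap2.induct with
  | case1 a b c t ih =>
    simp only [List.length_cons]
    rw [show t.length + 1 + 1 + 1 - 2 = (t.length + 1 + 1 - 2) + 1 from by omega]
    rw [List.range_succ_eq_map, List.map_cons, List.map_map]
    simp only [List.length_cons] at ih
    rw [show gap2 (a :: b :: c :: t) = (c - a) :: gap2 (b :: c :: t) from rfl, ← ih]
    simp [Function.comp_def]
  | case2 t h =>
    match t, h with
    | [], _ => rfl
    | [a], _ => rfl
    | [a, b], _ => rfl
    | a :: b :: c :: t, h => exact (h a b c t rfl).elim

-- pyRange/pyGetD loop → Nat-indexed map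
theorem pyMapRange_eq (m : Nat) (f : Int → Int) (g : Nat → Int)
    (hfg : ∀ k : Nat, f (k : Int) = g k) :
    (PySem.List.pyRange 0 (m : Int) 1).map f = (List.range m).map g := by
  rw [PySem.List.pyRange_one]
  simp only [List.map_map, Int.sub_zero, Int.toNat_natCast]
  apply List.map_congr_left
  intro k _
  simp [hfg k]

-- ===== VERDICT (by name: the statement is the Claim_ definition above) =====
theorem logs_spec : Claim_equal_logs := by
  intro arr _hdom hpre
  show logs arr = logs_alt arr
  simp only [logs, logs_alt]
  have hs : (PySem.List.sorted arr (fun x => x) false).length = arr.length :=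
    PySem.List.length_sorted arr (fun x => x) false
  set s := PySem.List.sorted arr (fun x => x) false with hsdef
  have hp : s.Pairwise (· ≤ ·) := PySem.List.sorted_pairwise arr (fun x => x)
  have hlen2 : 2 ≤ s.length := by rw [hs]; exact hpre
  -- A's value: max? (pairsAbs (zig s))
  have htemp : logsLoop s [] = zig s := by
    rw [logsLoop_eq]
    simpa using zig_eq s
  have hlenzig : (zig s).length = s.length := by
    induction s using zig.induct with
    | case1 => rfl
    | case2 a => rfl
    | case3 a b t ih => simp [zig]; omega
  have hdiff : (PySem.List.pyRange 0 (((logsLoop s []).length : Int) - 1) 1).foldl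
      (fun d i => d ++ [|PySem.List.pyGetD (logsLoop s []) i 0
        - PySem.List.pyGetD (logsLoop s []) (i + 1) 0|]) [] = pairsAbs (zig s) := by
    rw [PySem.List.foldl_append_singleton_eq_map, List.nil_append, htemp, hlenzig]
    rw [show ((s.length : Int) - 1) = (((s.length - 1 : Nat)) : Int) from by omega]
    rw [pyMapRange_eq (s.length - 1) _
      (fun k => |(zig s).getD k 0 - (zig s).getD (k + 1) 0|) ?_]
    · rw [show s.length - 1 = (zig s).length - 1 from by rw [hlenzig]]
      exact range_pairsAbs (zig s)
    · intro k
      rw [PySem.List.pyGetD_natCast, show ((k : Int) + 1) = ((k + 1 : Nat) : Int) from by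
        push_cast; ring, PySem.List.pyGetD_natCast]
  rw [hdiff]
  by_cases h2 : s.length = 2
  · -- both sides are the single gap
    obtain ⟨x, y, hxy⟩ := List.length_eq_two.mp h2
    have hxley : x ≤ y := by
      rw [hxy] at hp
      exact List.rel_of_pairwise_cons hp (by simp)
    have hif : (s.length == 2) = true := by simp [h2]
    rw [hif, if_pos rfl]
    rw [hxy]
    rw [show zig [x, y] = [x, y] from rfl]
    rw [show pairsAbs [x, y] = [|x - y|] from rfl]
    rw [PySem.List.max?_id_cons]
    simp only [List.foldl_nil, Option.getD_some]
    rw [show (1 : Int) = ((1 : Nat) : Int) from rfl, PySem.List.pyGetD_natCast,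
      show (0 : Int) = ((0 : Nat) : Int) from rfl, PySem.List.pyGetD_natCast]
    simp only [List.getD_cons_succ, List.getD_cons_zero]
    rw [abs_sub_comm]
    exact abs_of_nonneg (by omega)
  · have h3 : 3 ≤ s.length := by omega
    have hif : (s.length == 2) = false := by simp [h2]
    rw [hif]
    simp only [Bool.false_eq_true, if_false]
    have hcand : (PySem.List.pyRange 0 ((s.length : Int) - 2) 1).map
        (fun i => PySem.List.pyGetD s (i + 2) 0 - PySem.List.pyGetD s i 0) = gap2 s := by
      rw [show ((s.length : Int) - 2) = (((s.length - 2 : Nat)) : Int) from by omega]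
      rw [pyMapRange_eq (s.length - 2) _ (fun k => s.getD (k + 2) 0 - s.getD k 0) ?_]
      · exact range_gap2 s
      · intro k
        rw [show ((k : Int) + 2) = ((k + 2 : Nat) : Int) from by push_cast; ring,
          PySem.List.pyGetD_natCast, PySem.List.pyGetD_natCast]
    rw [hcand]
    rw [max_zig_eq_max_gap2 s.length s rfl hp h3]
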